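-- pv_equiv track=rewrite | github.com/unixwzrd/mlx-harmony | src/mlx_harmony/config.py | _replace_angle_tokens
-- ===== SOURCE A (Python) =====
-- from typing import Any, Dict, List, Optional
--
-- _ANGLE_PREFIX = "<|"
--
-- _ANGLE_SUFFIX = "|>"
--
-- def _replace_angle_tokens(value: str, replacements: Dict[str, str]) -> str:
--     """Replace <|TOKEN|> placeholders using the replacements map (case-insensitive)."""
--     parts: List[str] = []
--     idx = 0
--     length = len(value)
--     while idx < length:
--         start = value.find(_ANGLE_PREFIX, idx)
--         if start == -1:
--             parts.append(value[idx:])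
--             break
--         end = value.find(_ANGLE_SUFFIX, start + 2)
--         if end == -1:
--             parts.append(value[idx:])
--             break
--         parts.append(value[idx:start])
--         token = value[start + 2 : end]
--         token_upper = token.upper()
--         replacement = replacements.get(token_upper)
--         if replacement is None:
--             parts.append(value[start : end + 2])
--         else:
--             parts.append(replacement)
--         idx = end + 2
--     return "".join(parts)
-- ===== SOURCE B (Python) =====
-- from typing import Dict
--
--
-- def _replace_angle_tokens(value: str, replacements: Dict[str, str]) -> str:
--     """One-pass character scanner (state machine) instead of repeated str.find calls."""
--     out = []
--     token = None  # None = outside a token; else list of chars seen after "<|"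
--     i = 0
--     n = len(value)
--     while i < n:
--         c = value[i]
--         if token is None:
--             if c == '<' and i + 1 < n and value[i + 1] == '|':
--                 token = []
--                 i += 2
--             else:
--                 out.append(c)
--                 i += 1
--         else:
--             if c == '|' and i + 1 < n and value[i + 1] == '>':
--                 tok = ''.join(token)
--                 r = replacements.get(tok.upper())
--                 out.append('<|' + tok + '|>' if r is None else r)
--                 token = None
--                 i += 2
--             else:
--                 token.append(c)
--                 i += 1
--     if token is not None:
--         out.append('<|' + ''.join(token))
--     return ''.join(out)
-- ===== Notes on version B (the rewrite author's own statement) =====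
-- stated objective: alternative
-- what changed: Replaced A's repeated str.find scanner (two find calls and slice bookkeeping per token) with a single left-to-right character state machine that buffers token characters between '<|' and '|>'.
import Mathlib
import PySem

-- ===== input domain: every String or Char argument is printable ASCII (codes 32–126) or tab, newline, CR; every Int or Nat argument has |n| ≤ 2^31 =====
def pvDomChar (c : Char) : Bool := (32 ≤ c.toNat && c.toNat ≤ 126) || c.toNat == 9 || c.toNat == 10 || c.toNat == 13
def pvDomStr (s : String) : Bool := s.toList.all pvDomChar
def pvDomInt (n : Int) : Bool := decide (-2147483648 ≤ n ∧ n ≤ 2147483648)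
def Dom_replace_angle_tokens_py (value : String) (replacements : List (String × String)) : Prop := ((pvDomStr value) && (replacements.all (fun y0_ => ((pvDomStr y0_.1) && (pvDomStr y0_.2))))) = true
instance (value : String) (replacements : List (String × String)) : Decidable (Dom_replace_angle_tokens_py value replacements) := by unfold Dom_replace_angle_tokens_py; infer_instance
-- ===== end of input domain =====

-- B replaces A's repeated str.find scanner with a one-pass character state machine (objective: alternative).

-- ===== PORT A =====
-- A's while loop, ported on value.toList (PySem.Str.* are definitionally PySem.Chars.* on
-- toList).  Slices value[i:j] with 0 ≤ i ≤ j ≤ len are exactly (v.take j).drop i; "".join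
-- of the collected parts is exactly List.flatten on lists of chars.  The loop index idx
-- strictly increases each iteration, so fuel = length + 1 always suffices (the fuel-0 arm
-- is unreachable; it only makes the recursion total).
def pvALoop (v : List Char) (reps : List (String × String)) (fuel : Nat) (idx : Nat)
    (parts : List (List Char)) : List (List Char) :=
  match fuel with
  | 0 => parts
  | fuel + 1 =>
    if idx < v.length then
      let start := PySem.Chars.findFrom v ['<', '|'] (idx : Int)      -- value.find("<|", idx)
      if start = -1 then parts ++ [v.drop idx]
      else
        let e := PySem.Chars.findFrom v ['|', '>'] (start + 2)        -- value.find("|>", start+2)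
        if e = -1 then parts ++ [v.drop idx]
        else
          let token := (v.take e.toNat).drop (start.toNat + 2)        -- value[start+2:end]
          match PySem.Dict.get? ⟨reps⟩ (String.ofList (PySem.Chars.upper token)) with
          | none =>
            pvALoop v reps fuel (e.toNat + 2)
              (parts ++ [(v.take start.toNat).drop idx, (v.take (e.toNat + 2)).drop start.toNat])
          | some r =>
            pvALoop v reps fuel (e.toNat + 2) (parts ++ [(v.take start.toNat).drop idx, r.toList])
    else parts

def replace_angle_tokens_py (value : String) (replacements : List (String × String)) : String :=
  String.ofList (pvALoop value.toList replacements (value.toList.length + 1) 0 []).flatten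

-- ===== PORT B =====
-- B's single while loop over characters, as the obvious mutual structural recursion on the
-- remaining input: pvScanOut = the `token is None` state, pvScanTok = inside a token with
-- the buffered token chars `pend`.  `rest.head? = some _` encodes Source B's
-- `i + 1 < n and value[i+1] == _`.
mutual
def pvScanOut (reps : List (String × String)) : List Char → List Char
  | [] => []
  | c :: rest =>
    if c = '<' ∧ rest.head? = some '|' then pvScanTok reps rest.tail []
    else c :: pvScanOut reps rest
termination_by l => l.length
decreasing_by all_goals simp [List.length_tail]

def pvScanTok (reps : List (String × String)) : List Char → List Char → List Char
  | [], pend => '<' :: '|' :: pend                                    -- unterminated token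
  | c :: rest, pend =>
    if c = '|' ∧ rest.head? = some '>' then
      (match PySem.Dict.get? ⟨reps⟩ (String.ofList (PySem.Chars.upper pend)) with
       | none => '<' :: '|' :: (pend ++ ['|', '>'])
       | some r => r.toList) ++ pvScanOut reps rest.tail
    else pvScanTok reps rest (pend ++ [c])
termination_by l _ => l.length
decreasing_by all_goals simp [List.length_tail]
end

def replace_angle_tokens_py_alt (value : String) (replacements : List (String × String)) : String :=
  String.ofList (pvScanOut replacements value.toList)

-- ===== PRECONDITION & SPEC =====
def Spec_replace_angle_tokens_py (value : String) (replacements : List (String × String)) (out : String) : Prop := out = replace_angle_tokens_py_alt value replacements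
instance (value : String) (replacements : List (String × String)) (out : String) : Decidable (Spec_replace_angle_tokens_py value replacements out) := by unfold Spec_replace_angle_tokens_py; infer_instance

-- ===== CLAIM (what is proved, stated in full; the proofs are below) =====
def Claim_equal_replace_angle_tokens_py : Prop := ∀ (value : String) (replacements : List (String × String)), Dom_replace_angle_tokens_py value replacements → Spec_replace_angle_tokens_py value replacements (replace_angle_tokens_py value replacements)

-- ===== LEMMAS AND PROOFS =====

-- If "<|" does not occur in l, the outside-state scanner copies l unchanged.
theorem pvScanOut_no_prefix (reps : List (String × String)) (l : List Char)
    (h : ¬ ['<', '|'] <:+: l) : pvScanOut reps l = l := by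
  induction l with
  | nil => simp [pvScanOut]
  | cons c rest ih =>
    rw [pvScanOut]
    have hcond : ¬ (c = '<' ∧ rest.head? = some '|') := by
      rintro ⟨rfl, hh⟩
      obtain ⟨t, ht⟩ := List.head?_eq_some_iff.mp hh
      exact h (List.IsPrefix.isInfix ⟨t, by simp [ht]⟩)
    rw [if_neg hcond, ih (fun hin => h (hin.trans (List.suffix_cons c rest).isInfix))]

-- If "|>" does not occur in l, the in-token scanner reconstructs the unterminated tail.
theorem pvScanTok_no_close (reps : List (String × String)) (l : List Char)
    (h : ¬ ['|', '>'] <:+: l) : ∀ pend, pvScanTok reps l pend = '<' :: '|' :: (pend ++ l) := by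
  induction l with
  | nil => intro pend; simp [pvScanTok]
  | cons c rest ih =>
    intro pend
    rw [pvScanTok]
    have hcond : ¬ (c = '|' ∧ rest.head? = some '>') := by
      rintro ⟨rfl, hh⟩
      obtain ⟨t, ht⟩ := List.head?_eq_some_iff.mp hh
      exact h (List.IsPrefix.isInfix ⟨t, by simp [ht]⟩)
    rw [if_neg hcond, ih (fun hin => h (hin.trans (List.suffix_cons c rest).isInfix))]
    simp

-- Scanning past a token-free prefix copies it and enters the token state at the "<|".
theorem pvScanOut_skip (reps : List (String × String)) (pre rest : List Char)
    (h : ∀ i, i < pre.length → ¬ ['<', '|'] <+: (pre ++ '<' :: '|' :: rest).drop i) :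
    pvScanOut reps (pre ++ '<' :: '|' :: rest) = pre ++ pvScanTok reps rest [] := by
  induction pre with
  | nil => simp [pvScanOut]
  | cons p ps ih =>
    rw [List.cons_append, pvScanOut]
    have hcond : ¬ (p = '<' ∧ (ps ++ '<' :: '|' :: rest).head? = some '|') := by
      rintro ⟨rfl, hh⟩
      obtain ⟨t, ht⟩ := List.head?_eq_some_iff.mp hh
      exact h 0 (by simp) ⟨t, by simp [ht]⟩
    rw [if_neg hcond, ih (fun i hi => by
      have := h (i + 1) (by simp; omega)
      simpa using this)]
    simp

-- Consuming a close-free token body up to the first "|>" performs the lookup on the full token.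
theorem pvScanTok_consume (reps : List (String × String)) (tok after : List Char)
    (h : ∀ i, i < tok.length → ¬ ['|', '>'] <+: (tok ++ '|' :: '>' :: after).drop i) :
    ∀ pend, pvScanTok reps (tok ++ '|' :: '>' :: after) pend =
      (match PySem.Dict.get? ⟨reps⟩ (String.ofList (PySem.Chars.upper (pend ++ tok))) with
       | none => '<' :: '|' :: ((pend ++ tok) ++ ['|', '>'])
       | some r => r.toList) ++ pvScanOut reps after := by
  induction tok generalizing after with
  | nil => intro pend; simp [pvScanTok]
  | cons c tok' ih =>
    intro pend
    rw [List.cons_append, pvScanTok]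
    have hcond : ¬ (c = '|' ∧ (tok' ++ '|' :: '>' :: after).head? = some '>') := by
      rintro ⟨rfl, hh⟩
      obtain ⟨t, ht⟩ := List.head?_eq_some_iff.mp hh
      exact h 0 (by simp) ⟨t, by simp [ht]⟩
    rw [if_neg hcond, ih after (fun i hi => by
      have := h (i + 1) (by simp; omega)
      simpa using this) (pend ++ [c])]
    have : pend ++ c :: tok' = (pend ++ [c]) ++ tok' := by simp
    rw [this]

-- Loop invariant: A's loop from index idx produces exactly B's scan of the remaining input.
theorem pvALoop_eq_scan (v : List Char) (reps : List (String × String)) :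
    ∀ fuel idx parts, idx ≤ v.length → v.length - idx < fuel →
      (pvALoop v reps fuel idx parts).flatten = parts.flatten ++ pvScanOut reps (v.drop idx) := by
  intro fuel
  induction fuel with
  | zero => intro idx parts h1 h2; omega
  | succ fuel ih =>
    intro idx parts hidx hfuel
    rw [pvALoop]
    by_cases hlt : idx < v.length
    · rw [if_pos hlt]
      by_cases hs1 : PySem.Chars.findFrom v ['<', '|'] (idx : Int) = -1
      · rw [if_pos hs1,
          pvScanOut_no_prefix reps _ ((PySem.Chars.findFrom_natCast_eq_neg_one_iff v _ idx hidx).mp hs1)]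
        simp
      · obtain ⟨hsle, hspre, hsmin⟩ := PySem.Chars.findFrom_natCast_spec v ['<', '|'] idx hidx hs1
        set F1 := PySem.Chars.findFrom v ['<', '|'] (idx : Int) with hF1def
        set s := F1.toNat with hsdef
        have hF1 : F1 = (s : Int) := by
          rw [hsdef, Int.toNat_of_nonneg (by exact_mod_cast le_trans (by positivity) hsle)]
        have hidxs : idx ≤ s := by omega
        obtain ⟨u, hu⟩ := hspre
        have hulen : v.length = s + 2 + u.length := by
          have := congrArg List.length hu
          simp [List.length_drop] at this
          omega
        have hdropS2 : v.drop (s + 2) = u := by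
          have : (v.drop s).drop 2 = u := by rw [← hu]; simp
          rwa [List.drop_drop] at this
        have hdropS : v.drop s = '<' :: '|' :: v.drop (s + 2) := by
          rw [hdropS2, ← hu]; rfl
        have hs2len : s + 2 ≤ v.length := by omega
        have hdecomp : v.drop idx = (v.take s).drop idx ++ '<' :: '|' :: v.drop (s + 2) := by
          conv_lhs => rw [← List.take_append_drop s v, List.drop_append]
          rw [Nat.sub_eq_zero_of_le (by simp [List.length_take]; omega), List.drop_zero, hdropS]
        have hprelen : ((v.take s).drop idx).length = s - idx := by
          simp [List.length_drop, List.length_take]; omega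
        have hF12 : F1 + 2 = ((s + 2 : Nat) : Int) := by rw [hF1]; push_cast; ring
        rw [if_neg hs1, hF12]
        -- B's scanner on the remaining input: copy the token-free prefix, enter token state
        have hskip : pvScanOut reps (v.drop idx) =
            (v.take s).drop idx ++ pvScanTok reps (v.drop (s + 2)) [] := by
          rw [hdecomp]
          refine pvScanOut_skip reps _ _ (fun i hi => ?_)
          rw [← hdecomp, List.drop_drop]
          exact hsmin (idx + i) (by omega) (by omega)
        by_cases he1 : PySem.Chars.findFrom v ['|', '>'] ((s + 2 : Nat) : Int) = -1
        · rw [if_pos he1, hskip,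
            pvScanTok_no_close reps _
              ((PySem.Chars.findFrom_natCast_eq_neg_one_iff v _ (s + 2) hs2len).mp he1) [],
            hdecomp]
          simp
        · obtain ⟨htle, htpre, htmin⟩ := PySem.Chars.findFrom_natCast_spec v ['|', '>'] (s + 2) hs2len he1
          set F2 := PySem.Chars.findFrom v ['|', '>'] ((s + 2 : Nat) : Int) with hF2def
          set t := F2.toNat with htdef
          have hF2 : F2 = (t : Int) := by
            rw [htdef, Int.toNat_of_nonneg (by exact_mod_cast le_trans (by positivity) htle)]
          have hst : s + 2 ≤ t := by omega
          obtain ⟨w, hw⟩ := htpre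
          have hwlen : v.length = t + 2 + w.length := by
            have := congrArg List.length hw
            simp [List.length_drop] at this
            omega
          have hdropT2 : v.drop (t + 2) = w := by
            have : (v.drop t).drop 2 = w := by rw [← hw]; simp
            rwa [List.drop_drop] at this
          have hdropT : v.drop t = '|' :: '>' :: v.drop (t + 2) := by
            rw [hdropT2, ← hw]; rfl
          have ht2len : t + 2 ≤ v.length := by omega
          set tok := (v.take t).drop (s + 2) with htokdef
          have htoklen : tok.length = t - (s + 2) := by
            simp [htokdef, List.length_drop, List.length_take]; omega
          have hrest : v.drop (s + 2) = tok ++ '|' :: '>' :: v.drop (t + 2) := by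
            conv_lhs => rw [← List.take_append_drop t v, List.drop_append]
            rw [Nat.sub_eq_zero_of_le (by simp [List.length_take]; omega), List.drop_zero, hdropT,
              htokdef]
          have hseg : (v.take (t + 2)).drop s = '<' :: '|' :: (tok ++ ['|', '>']) := by
            rw [List.drop_take]
            have h1 : t + 2 - s = tok.length + 4 := by omega
            rw [h1, hdropS, hrest]
            simp [List.take_append]
          -- B's in-token scanner consumes tok and performs the lookup
          have hconsume : pvScanTok reps (v.drop (s + 2)) [] =
              (match PySem.Dict.get? ⟨reps⟩ (String.ofList (PySem.Chars.upper tok)) with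
               | none => '<' :: '|' :: (tok ++ ['|', '>'])
               | some r => r.toList) ++ pvScanOut reps (v.drop (t + 2)) := by
            rw [hrest]
            rw [pvScanTok_consume reps _ _ (fun i hi => by
              rw [← hrest, List.drop_drop]
              exact htmin (s + 2 + i) (by omega) (by omega)) []]
            simp
          rw [if_neg he1]
          have hih := fun parts' => ih (t + 2) parts' ht2len (by omega)
          have htokeq : (v.take F2.toNat).drop (F1.toNat + 2) = tok := rfl
          simp only []
          rw [htokeq]
          cases hget : PySem.Dict.get? ⟨reps⟩ (String.ofList (PySem.Chars.upper tok)) with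
          | none =>
            rw [hih, hskip, hconsume, hget]
            have hsegeq : (v.take (F2.toNat + 2)).drop F1.toNat = '<' :: '|' :: (tok ++ ['|', '>']) := hseg
            rw [hsegeq]
            simp
            rfl
          | some r =>
            rw [hih, hskip, hconsume, hget]
            simp
            rfl
    · rw [if_neg hlt]
      have hidx' : idx = v.length := by omega
      subst hidx'
      simp [List.drop_length, pvScanOut]

-- ===== VERDICT (by name: the statement is the Claim_ definition above) =====
theorem replace_angle_tokens_py_spec : Claim_equal_replace_angle_tokens_py := by
  intro value replacements _
  unfold Spec_replace_angle_tokens_py replace_angle_tokens_py replace_angle_tokens_py_alt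
  rw [pvALoop_eq_scan value.toList replacements _ 0 [] (by omega) (by omega)]
  simp
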